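-- pv_equiv track=rewrite | github.com/limabia/spamminator | codigo/main.py | pre_processamento
-- ===== SOURCE A (Python) =====
-- import string
--
-- def pre_processamento(mess):
--     nopunc = []
--     for char in mess:
--         if char not in string.punctuation:
--             nopunc.append(char)
--         else:
--             nopunc.append(' ')
--     nopunc = ''.join(nopunc)
--     return [word.lower() for word in nopunc.split()]
-- ===== SOURCE B (Python) =====
-- import string
--
-- def pre_processamento(mess):
--     result = []
--     current = []
--     for char in mess:
--         if char in string.punctuation or char.isspace():
--             if current:
--                 result.append(''.join(current).lower())
--                 current = []
--         else:
--             current.append(char)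
--     if current:
--         result.append(''.join(current).lower())
--     return result
-- ===== Notes on version B (the rewrite author's own statement) =====
-- stated objective: simpler
-- what changed: Replaces the three-pass pipeline (build a punctuation-replaced copy, str.split() it, lowercase each word) with a single left-to-right pass that maintains a current-word buffer and flushes it lowercased at each separator.
import Mathlib
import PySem

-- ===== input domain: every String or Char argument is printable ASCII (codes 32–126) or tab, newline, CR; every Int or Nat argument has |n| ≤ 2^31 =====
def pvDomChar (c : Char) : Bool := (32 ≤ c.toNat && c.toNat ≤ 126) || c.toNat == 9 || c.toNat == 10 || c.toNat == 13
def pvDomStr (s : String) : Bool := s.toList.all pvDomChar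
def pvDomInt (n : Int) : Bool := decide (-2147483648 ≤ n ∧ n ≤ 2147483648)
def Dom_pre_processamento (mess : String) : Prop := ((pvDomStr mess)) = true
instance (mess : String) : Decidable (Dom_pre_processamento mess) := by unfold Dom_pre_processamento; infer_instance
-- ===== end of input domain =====

-- B collapses A's build-replaced-copy / split / lowercase pipeline into one pass with a
-- current-word buffer; same return value, no speed claim (objective: simpler).

-- string.punctuation (shared constant of both Pythons)
def pvPunct : List Char := "!\"#$%&'()*+,-./:;<=>?@[\\]^_`{|}~".toList

-- ===== PORT A =====
def pre_processamento (mess : String) : List String :=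
  let nopunc := mess.toList.foldl
    (fun acc c => if c ∉ pvPunct then acc ++ [c] else acc ++ [' ']) []
  (PySem.Str.split₀ (String.ofList nopunc)).map PySem.Str.lower

-- ===== PORT B =====
-- single pass: res = words emitted so far, cur = chars of the word being read
def pvBGo : List Char → List String → List Char → List String
  | [], res, cur =>
      if cur.isEmpty then res else res ++ [String.ofList (PySem.Chars.lower cur)]
  | c :: rest, res, cur =>
      if c ∈ pvPunct || PySem.Chars.isspace c then
        if cur.isEmpty then pvBGo rest res []
        else pvBGo rest (res ++ [String.ofList (PySem.Chars.lower cur)]) []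
      else pvBGo rest res (cur ++ [c])

def pre_processamento_alt (mess : String) : List String := pvBGo mess.toList [] []

-- ===== PRECONDITION & SPEC =====
def Spec_pre_processamento (mess : String) (out : List String) : Prop := out = pre_processamento_alt mess
instance (mess : String) (out : List String) : Decidable (Spec_pre_processamento mess out) := by unfold Spec_pre_processamento; infer_instance

-- ===== CLAIM (what is proved, stated in full; the proofs are below) =====
def Claim_equal_pre_processamento : Prop := ∀ (mess : String), Dom_pre_processamento mess → Spec_pre_processamento mess (pre_processamento mess)

-- ===== LEMMAS AND PROOFS =====

-- A's replacement of one char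
def pvRepl (c : Char) : Char := if c ∈ pvPunct then ' ' else c

lemma pvFoldl_repl (s : List Char) (a : List Char) :
    s.foldl (fun acc c => if c ∉ pvPunct then acc ++ [c] else acc ++ [' ']) a
      = a ++ s.map pvRepl := by
  induction s generalizing a with
  | nil => simp
  | cons c rest ih =>
      simp only [List.foldl_cons, List.map_cons, ih, pvRepl]
      by_cases h : c ∈ pvPunct <;> simp [h]

def pvF (w : List Char) : String := String.ofList (PySem.Chars.lower w)

lemma pvSep_eq (c : Char) :
    PySem.Chars.isspace (pvRepl c) = (decide (c ∈ pvPunct) || PySem.Chars.isspace c) := by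
  by_cases h : c ∈ pvPunct
  · simp [pvRepl, h]
    decide
  · simp [pvRepl, h]

lemma pvLower_ofList (w : List Char) : PySem.Str.lower (String.ofList w) = pvF w := by
  simp [PySem.Str.lower, pvF]

lemma pvGo_eq (s : List Char) (cur : List Char) (acc : List (List Char)) :
    (PySem.Chars.split₀.go (s.map pvRepl) cur acc).map pvF
      = pvBGo s ((acc.reverse).map pvF) cur.reverse := by
  induction s generalizing cur acc with
  | nil =>
      simp only [List.map_nil, PySem.Chars.split₀.go, pvBGo]
      by_cases h : cur.isEmpty
      · simp [List.isEmpty_iff.mp h]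
      · have : cur.reverse.isEmpty = false := by
          simp only [List.isEmpty_reverse]; simpa using h
        simp [h, this, pvF]
  | cons c rest ih =>
      simp only [List.map_cons, PySem.Chars.split₀.go, pvBGo, pvSep_eq c]
      by_cases hs : (decide (c ∈ pvPunct) || PySem.Chars.isspace c) = true
      · by_cases h : cur.isEmpty
        · have h2 : cur.reverse.isEmpty = true := by
            simp only [List.isEmpty_reverse]; simpa using h
          simpa [hs, h, h2] using ih [] acc
        · have h2 : cur.reverse.isEmpty = false := by
            simp only [List.isEmpty_reverse]; simpa using h
          simpa [hs, h, h2, pvF] using ih [] (cur.reverse :: acc)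
      · have hs' : (decide (c ∈ pvPunct) || PySem.Chars.isspace c) = false := by
          simpa using hs
        have hp : c ∉ pvPunct := by
          intro hc; simp [hc] at hs'
        have hrc : pvRepl c = c := by simp [pvRepl, hp]
        simpa [hs', hrc] using ih (c :: cur) acc

-- ===== VERDICT (by name: the statement is the Claim_ definition above) =====
theorem pre_processamento_spec : Claim_equal_pre_processamento := by
  intro mess _
  show pre_processamento mess = pre_processamento_alt mess
  unfold pre_processamento pre_processamento_alt
  rw [pvFoldl_repl]
  simp only [List.nil_append, PySem.Str.split₀]
  have hf : (PySem.Str.lower ∘ String.ofList) = pvF := funext pvLower_ofList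
  have h := pvGo_eq mess.toList [] []
  simpa [PySem.Chars.split₀, hf, List.map_map] using h
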